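-- pv_equiv track=rewrite | github.com/HoboKristian/KnowITJulekalender2018 | 5/main.py | convert
-- ===== SOURCE A (Python) =====
-- def remove_n(option):
--     numbers = [1, 2, 3, 4, 5, 6, 7, 8, 7, 6, 5, 4, 3, 2, 1]
--
--     out_numbers = []
--     out_options = []
--     for o, curr in zip(option, numbers):
--         if o == "n":
--             old = out_numbers[-1]
--             out_numbers[-1] = old * 10 + curr
--         else:
--             out_numbers.append(curr)
--             out_options.append(o)
--     return zip(out_options, out_numbers)
--
-- def convert(option):
--     s = 0
--     option = list(option)
--     option.insert(0, "a")
--     for o, n in remove_n(option):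
--         if o == "a":
--             s += n
--         elif o == "s":
--             s -= n
--     return s
-- ===== SOURCE B (Python) =====
-- def convert(option):
--     numbers = [1, 2, 3, 4, 5, 6, 7, 8, 7, 6, 5, 4, 3, 2, 1]
--     s = 0
--     cop, cur = "a", 0
--     for o, n in zip("a" + option, numbers):
--         if o == "n":
--             cur = cur * 10 + n
--         else:
--             if cop == "a":
--                 s += cur
--             elif cop == "s":
--                 s -= cur
--             cop, cur = o, n
--     if cop == "a":
--         s += cur
--     elif cop == "s":
--         s -= cur
--     return s
-- ===== Notes on version B (the rewrite author's own statement) =====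
-- stated objective: simpler
-- what changed: Replaced A's two-phase design (remove_n builds intermediate out_numbers/out_options lists that a second loop then folds) with one streaming pass over zip('a'+option, numbers) that keeps only a running sum, the current group's option char and its accumulated value, committing a group when the next one starts and once after the loop.
import Mathlib
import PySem

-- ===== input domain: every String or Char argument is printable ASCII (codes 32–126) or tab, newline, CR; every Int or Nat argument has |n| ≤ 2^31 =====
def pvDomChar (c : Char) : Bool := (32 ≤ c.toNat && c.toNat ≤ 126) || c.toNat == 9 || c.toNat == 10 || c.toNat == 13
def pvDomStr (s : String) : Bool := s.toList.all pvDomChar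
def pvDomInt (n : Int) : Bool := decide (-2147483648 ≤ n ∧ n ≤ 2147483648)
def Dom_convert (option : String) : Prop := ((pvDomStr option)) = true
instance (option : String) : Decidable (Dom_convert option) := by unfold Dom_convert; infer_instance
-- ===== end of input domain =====

-- B replaces A's build-two-lists-then-fold ('remove_n' plus a summing loop) with a
-- single streaming pass keeping a running sum, current group value and group option (objective: simpler).

-- ===== PORT A =====
-- loop body of remove_n: state = (out_numbers, out_options)
def pvStepA (st : List Int × List Char) (p : Char × Int) : List Int × List Char :=
  if p.1 = 'n' then
    -- old = out_numbers[-1]; out_numbers[-1] = old * 10 + curr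
    match PySem.List.pyGet? st.1 (-1) with
    | some old => (st.1.dropLast ++ [old * 10 + p.2], st.2)
    | none => (st.1, st.2)  -- Python raises IndexError here; unreachable: convert prepends 'a'
  else (st.1 ++ [p.2], st.2 ++ [p.1])

def pvRemoveN (option : List Char) : List (Char × Int) :=
  let numbers : List Int := [1, 2, 3, 4, 5, 6, 7, 8, 7, 6, 5, 4, 3, 2, 1]
  let st := (option.zip numbers).foldl pvStepA ([], [])
  st.2.zip st.1

-- loop body of convert's summing loop
def pvSumStep (s : Int) (p : Char × Int) : Int :=
  if p.1 = 'a' then s + p.2 else if p.1 = 's' then s - p.2 else s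

def convert (option : String) : Int :=
  (pvRemoveN ('a' :: option.toList)).foldl pvSumStep 0

-- ===== PORT B =====
-- commit the finished group into the sum
def pvCommit (s : Int) (cop : Char) (cur : Int) : Int :=
  if cop = 'a' then s + cur else if cop = 's' then s - cur else s

-- loop body of B: state = (s, cop, cur)
def pvStepB (st : Int × Char × Int) (p : Char × Int) : Int × Char × Int :=
  if p.1 = 'n' then (st.1, st.2.1, st.2.2 * 10 + p.2)
  else (pvCommit st.1 st.2.1 st.2.2, p.1, p.2)

def convert_alt (option : String) : Int :=
  let numbers : List Int := [1, 2, 3, 4, 5, 6, 7, 8, 7, 6, 5, 4, 3, 2, 1]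
  let st := (('a' :: option.toList).zip numbers).foldl pvStepB (0, 'a', 0)
  pvCommit st.1 st.2.1 st.2.2

-- ===== PRECONDITION & SPEC =====
def Spec_convert (option : String) (out : Int) : Prop := out = convert_alt option
instance (option : String) (out : Int) : Decidable (Spec_convert option out) := by unfold Spec_convert; infer_instance

-- ===== CLAIM (what is proved, stated in full; the proofs are below) =====
def Claim_equal_convert : Prop := ∀ (option : String), Dom_convert option → Spec_convert option (convert option)

-- ===== LEMMAS AND PROOFS =====

-- Invariant: A's state is (pN ++ [cur], pO ++ [cop]) where (pN, pO) are the closed groups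
-- and (cop, cur) the open one, B's state is (s, cop, cur) with s the sum of the closed groups.
lemma pv_loop_eq (ps : List (Char × Int)) :
    ∀ (pN : List Int) (pO : List Char) (cop : Char) (cur s : Int),
    pO.length = pN.length →
    s = (pO.zip pN).foldl pvSumStep 0 →
    (let st := ps.foldl pvStepA (pN ++ [cur], pO ++ [cop])
     (st.2.zip st.1).foldl pvSumStep 0)
    = (let st := ps.foldl pvStepB (s, cop, cur)
       pvCommit st.1 st.2.1 st.2.2) := by
  induction ps with
  | nil =>
    intro pN pO cop cur s hlen hs
    simp only [List.foldl_nil]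
    rw [List.zip_append hlen, List.foldl_append, ← hs]
    simp [pvSumStep, pvCommit]
  | cons p ps ih =>
    intro pN pO cop cur s hlen hs
    simp only [List.foldl_cons]
    by_cases hn : p.1 = 'n'
    · have hA : pvStepA (pN ++ [cur], pO ++ [cop]) p
          = (pN ++ [cur * 10 + p.2], pO ++ [cop]) := by
        simp [pvStepA, hn, PySem.List.pyGet?_neg_one_append_singleton]
      have hB : pvStepB (s, cop, cur) p = (s, cop, cur * 10 + p.2) := by
        simp [pvStepB, hn]
      rw [hA, hB]
      exact ih pN pO cop (cur * 10 + p.2) s hlen hs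
    · have hA : pvStepA (pN ++ [cur], pO ++ [cop]) p
          = ((pN ++ [cur]) ++ [p.2], (pO ++ [cop]) ++ [p.1]) := by
        simp [pvStepA, hn]
      have hB : pvStepB (s, cop, cur) p = (pvCommit s cop cur, p.1, p.2) := by
        simp [pvStepB, hn]
      rw [hA, hB]
      refine ih (pN ++ [cur]) (pO ++ [cop]) p.1 p.2 (pvCommit s cop cur) (by simp [hlen]) ?_
      rw [List.zip_append hlen, List.foldl_append, ← hs]
      simp [pvSumStep, pvCommit]

-- ===== VERDICT (by name: the statement is the Claim_ definition above) =====
theorem convert_spec : Claim_equal_convert := by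
  intro option _
  unfold Spec_convert convert convert_alt pvRemoveN
  simp only [List.zip_cons_cons, List.foldl_cons]
  have hA : pvStepA ([], []) ('a', (1 : Int)) = (([] : List Int) ++ [1], ([] : List Char) ++ ['a']) := by
    simp [pvStepA]
  have hB : pvStepB (0, 'a', 0) ('a', (1 : Int)) = ((0 : Int), 'a', (1 : Int)) := by
    simp [pvStepB, pvCommit]
  rw [hA, hB]
  exact pv_loop_eq _ [] [] 'a' 1 0 rfl rfl
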